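-- pv_equiv track=rewrite | github.com/raminrezvani/SmartSepehrBackEnd | app_utils/validation.py | check_body
-- ===== SOURCE A (Python) =====
-- def check_body(value_list: [list, tuple], body: dict) -> bool:
--     """
--     check dict body (check if dict contains value_list keys or not)
--     :param value_list: list ==> value that you want check
--     :param body: list ==> dict that you want to check
--     :return: bool ==> True = value list is incorrect
--     """
--     try:
--         result = []
--         if len(body.keys()) == 0:
--             return True
--
--         if type(body) is not dict:
--             return True
--
--         for value in dict(body).keys():
--             if value in value_list:
--                 result.append(True)
--
--         if len(result) == len(value_list) and len(value_list) == len(body.keys()):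
--             return False
--
--         return True
--     except:
--         return True
-- ===== SOURCE B (Python) =====
-- def check_body(value_list: [list, tuple], body: dict) -> bool:
--     try:
--         if len(body.keys()) == 0:
--             return True
--         if type(body) is not dict:
--             return True
--         return not (len(value_list) == len(body.keys())
--                     and set(value_list) == set(body.keys()))
--     except:
--         return True
-- ===== Notes on version B (the rewrite author's own statement) =====
-- stated objective: faster
-- what changed: The counting loop with its O(m) 'value in value_list' list scan per key and the result accumulator are removed: B compares set(value_list) with set(body.keys()) once, paired with an equal-length check that preserves A's behaviour on duplicate entries in value_list.
import Mathlib
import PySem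

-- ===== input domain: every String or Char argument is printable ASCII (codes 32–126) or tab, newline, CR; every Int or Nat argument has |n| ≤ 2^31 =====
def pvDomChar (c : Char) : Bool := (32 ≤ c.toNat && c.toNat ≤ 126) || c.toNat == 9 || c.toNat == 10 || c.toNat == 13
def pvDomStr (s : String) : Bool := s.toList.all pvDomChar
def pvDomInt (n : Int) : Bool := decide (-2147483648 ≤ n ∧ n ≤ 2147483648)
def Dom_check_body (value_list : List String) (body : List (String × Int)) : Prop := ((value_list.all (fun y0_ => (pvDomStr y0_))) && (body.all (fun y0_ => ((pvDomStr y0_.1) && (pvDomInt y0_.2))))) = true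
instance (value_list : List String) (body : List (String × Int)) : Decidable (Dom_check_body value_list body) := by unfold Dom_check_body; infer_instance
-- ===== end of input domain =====

-- B replaces A's counting loop and accumulator with one set comparison plus an equal-length
-- check, replacing the per-key list scan with set membership (objective: faster); equivalence is exact.
-- ===== PORT A =====
-- try/except: no statement in A's body can raise on a well-typed (list, dict) input, so the
-- except branch is unreachable and not ported. 'type(body) is not dict' is statically false
-- under the type convention (body IS the dict); it is kept as the literal 'if false' branch.
def check_body (value_list : List String) (body : List (String × Int)) : Bool :=
  let keys := (PySem.Dict.ofList body).keys
  if keys.length = 0 then true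
  else if false then true
  else
    let result : List Bool :=
      keys.foldl (fun r v => if value_list.contains v then r ++ [true] else r) []
    if result.length = value_list.length ∧ value_list.length = keys.length then false
    else true

-- ===== PORT B =====
def check_body_alt (value_list : List String) (body : List (String × Int)) : Bool :=
  let keys := (PySem.Dict.ofList body).keys
  if keys.length = 0 then true
  else if false then true
  else
    !(decide (value_list.length = keys.length) &&
      PySem.Set.equal (PySem.Set.ofList value_list) (PySem.Set.ofList keys))

-- ===== PRECONDITION & SPEC =====
def Spec_check_body (value_list : List String) (body : List (String × Int)) (out : Bool) : Prop := out = check_body_alt value_list body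
instance (value_list : List String) (body : List (String × Int)) (out : Bool) : Decidable (Spec_check_body value_list body out) := by unfold Spec_check_body; infer_instance

-- ===== CLAIM (what is proved, stated in full; the proofs are below) =====
def Claim_equal_check_body : Prop := ∀ (value_list : List String) (body : List (String × Int)), Dom_check_body value_list body → Spec_check_body value_list body (check_body value_list body)

-- ===== LEMMAS AND PROOFS =====

-- Core fact: for a duplicate-free key list, A's count-and-compare condition coincides with
-- B's length-plus-set-equality condition.
theorem check_body_count_iff_sets (vl ks : List String) (hk : ks.Nodup) :
    ((ks.countP (fun v => vl.contains v) = vl.length ∧ vl.length = ks.length) ↔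
      (vl.length = ks.length ∧ ∀ x, x ∈ vl ↔ x ∈ ks)) := by
  constructor
  · rintro ⟨hc, hl⟩
    refine ⟨hl, ?_⟩
    have hall : ∀ v ∈ ks, vl.contains v = true := by
      have : ks.countP (fun v => vl.contains v) = ks.length := by omega
      exact List.countP_eq_length.mp this
    have hsub : ks.toFinset ⊆ vl.toFinset := by
      intro x hx
      simp only [List.mem_toFinset] at hx ⊢
      simpa using hall x hx
    have hcard : vl.toFinset.card ≤ ks.toFinset.card := by
      have h1 : ks.toFinset.card = ks.length := List.toFinset_card_of_nodup hk
      have h2 : vl.toFinset.card ≤ vl.length := vl.toFinset_card_le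
      omega
    have heq : ks.toFinset = vl.toFinset := Finset.eq_of_subset_of_card_le hsub hcard
    intro x
    constructor
    · intro hx
      have : x ∈ vl.toFinset := List.mem_toFinset.mpr hx
      rw [← heq] at this
      exact List.mem_toFinset.mp this
    · intro hx
      have : x ∈ ks.toFinset := List.mem_toFinset.mpr hx
      rw [heq] at this
      exact List.mem_toFinset.mp this
  · rintro ⟨hl, hset⟩
    refine ⟨?_, hl⟩
    have : ks.countP (fun v => vl.contains v) = ks.length :=
      List.countP_eq_length.mpr (fun v hv => by simpa using (hset v).mpr hv)
    omega

-- ===== VERDICT (by name: the statement is the Claim_ definition above) =====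
theorem check_body_spec : Claim_equal_check_body := by
  intro vl body _
  unfold Spec_check_body check_body check_body_alt
  have hk : (PySem.Dict.ofList body).keys.Nodup := PySem.Dict.nodup_keys_ofList body
  set ks := (PySem.Dict.ofList body).keys with hks
  simp only [if_false, Bool.false_eq_true]
  by_cases h0 : ks.length = 0
  · simp [h0]
  · simp only [h0, if_false]
    rw [PySem.List.foldl_append_if (fun v => vl.contains v) (fun _ => true) ks []]
    have hlen : (List.map (fun _ => true) (ks.filter fun v => vl.contains v)).length
        = ks.countP (fun v => vl.contains v) := by
      simp [List.countP_eq_length_filter]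
    have hiff := check_body_count_iff_sets vl ks hk
    rw [PySem.Set.ofList_eq_self_of_nodup ks hk]
    by_cases hc : ks.countP (fun v => vl.contains v) = vl.length ∧ vl.length = ks.length
    · have hb := hiff.mp hc
      simp only [List.nil_append, hlen, hc, and_self, if_pos]
      have hset : PySem.Set.equal (PySem.Set.ofList vl) ks = true := by
        rw [PySem.Set.equal_iff]
        intro x
        rw [PySem.Set.mem_ofList]
        exact hb.2 x
      simp [hset]
    · simp only [List.nil_append, hlen]
      rw [if_neg hc]
      have hb : ¬ (vl.length = ks.length ∧ ∀ x, x ∈ vl ↔ x ∈ ks) := fun h => hc (hiff.mpr h)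
      by_cases hl : vl.length = ks.length
      · have hns : ¬ ∀ x, x ∈ vl ↔ x ∈ ks := fun h => hb ⟨hl, h⟩
        cases hh : PySem.Set.equal (PySem.Set.ofList vl) ks with
        | false => simp
        | true =>
          exact absurd
            (fun x => ((PySem.Set.mem_ofList (xs := vl) (y := x)).symm.trans
              (((PySem.Set.equal_iff (PySem.Set.ofList vl) ks).mp hh) x)))
            hns
      · simp [hl]
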